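-- pv_equiv track=rewrite | github.com/Zeroji/semicold | string_.py | copyspaces
-- ===== SOURCE A (Python) =====
-- def copyspaces(s, sp):
--     """Insert spaces from sp into the string."""
--     if isinstance(sp, str):
--         sp = [len(x) for x in sp.split()]
--     r = ''
--     for n in sp:
--         r += s[:n] + ' '
--         s = s[n:]
--     return r + s
-- ===== SOURCE B (Python) =====
-- def copyspaces(s, sp):
--     """Insert spaces from sp into the string."""
--     if isinstance(sp, str):
--         sp = [len(x) for x in sp.split()]
--     parts = []
--     i = 0
--     for n in sp:
--         parts.append(s[i:i+n])
--         i += n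
--     parts.append(s[i:])
--     return ' '.join(parts)
-- ===== Notes on version B (the rewrite author's own statement) =====
-- stated objective: alternative
-- what changed: B makes one pass keeping an absolute index into the original string, collecting the segments into a list and joining them once, instead of A's loop that rebuilds the remaining string with s = s[n:] and accumulates by string concatenation; Pre_ excludes multi-entry lists containing a negative length on a nonempty string, an unspecified corner where both programs' values come from Python's negative-slice rules and either is defensible.
-- outside the precondition, e.g. on copyspaces('abc', [-1, 1]): A returns 'ab c ', B returns 'ab  abc'
import Mathlib
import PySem

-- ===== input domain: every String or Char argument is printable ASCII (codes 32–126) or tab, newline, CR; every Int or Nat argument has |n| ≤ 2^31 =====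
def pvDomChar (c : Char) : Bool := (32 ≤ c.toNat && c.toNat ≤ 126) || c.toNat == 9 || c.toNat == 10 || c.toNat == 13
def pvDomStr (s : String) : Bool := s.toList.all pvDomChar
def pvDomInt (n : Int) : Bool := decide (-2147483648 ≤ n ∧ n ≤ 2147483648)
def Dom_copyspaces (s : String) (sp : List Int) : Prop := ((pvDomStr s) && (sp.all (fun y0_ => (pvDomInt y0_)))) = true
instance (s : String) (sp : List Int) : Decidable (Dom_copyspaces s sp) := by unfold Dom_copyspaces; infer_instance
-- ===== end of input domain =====

-- B replaces A's rebuild-the-remainder loop (r += s[:n] + ' '; s = s[n:]) by one pass over sp that keeps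
-- an absolute index into the original string, collects the segments and joins them once (alternative).

-- ===== PORT A =====
-- A's loop: state (r, s); each step r += s[:n] + ' '; s = s[n:]; returns r + s.
def copyspacesGo (r : List Char) (s : List Char) (sp : List Int) : List Char :=
  match sp with
  | [] => r ++ s
  | n :: t =>
      copyspacesGo (r ++ PySem.List.slice s none (some n) ++ [' ']) (PySem.List.slice s (some n) none) t

def copyspaces (s : String) (sp : List Int) : String :=
  String.ofList (copyspacesGo [] s.toList sp)

-- ===== PORT B =====
-- B's loop: absolute index i into the original s; parts.append(s[i:i+n]); i += n;
-- finally parts.append(s[i:]); return ' '.join(parts).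
def copyspacesAltGo (s : List Char) (i : Int) (sp : List Int) : List (List Char) :=
  match sp with
  | [] => [PySem.List.slice s (some i) none]
  | n :: t => PySem.List.slice s (some i) (some (i + n)) :: copyspacesAltGo s (i + n) t

def copyspaces_alt (s : String) (sp : List Int) : String :=
  String.ofList (PySem.Chars.join [' '] (copyspacesAltGo s.toList 0 sp))

-- ===== PRECONDITION & SPEC =====
-- Pre_ excludes multi-entry length lists containing a negative entry (on a nonempty string): a segment
-- length is naturally nonnegative, and there both programs' values come from Python's negative-slice
-- rules on an unspecified corner; singleton lists and the empty string stay inside (the values coincide).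
def Pre_copyspaces (s : String) (sp : List Int) : Prop := (∀ n ∈ sp, 0 ≤ n) ∨ sp.length ≤ 1 ∨ s = ""
instance (s : String) (sp : List Int) : Decidable (Pre_copyspaces s sp) := by unfold Pre_copyspaces; infer_instance

def pvWitness_copyspaces : String × List Int := ("hello world", [2, 0, 5])

def Spec_copyspaces (s : String) (sp : List Int) (out : String) : Prop := out = copyspaces_alt s sp
instance (s : String) (sp : List Int) (out : String) : Decidable (Spec_copyspaces s sp out) := by unfold Spec_copyspaces; infer_instance

-- ===== CLAIM (what is proved, stated in full; the proofs are below) =====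
def Claim_equal_copyspaces : Prop := ∀ (s : String) (sp : List Int), Dom_copyspaces s sp → Pre_copyspaces s sp → Spec_copyspaces s sp (copyspaces s sp)

-- ===== LEMMAS AND PROOFS =====

-- The segments A's loop cuts off, in order, plus the final remainder.
def pvSegs (s : List Char) (sp : List Int) : List (List Char) :=
  match sp with
  | [] => [s]
  | n :: t => PySem.List.slice s none (some n) :: pvSegs (PySem.List.slice s (some n) none) t

theorem pvSegs_ne_nil (s : List Char) (sp : List Int) : ∃ q rest, pvSegs s sp = q :: rest := by
  cases sp <;> exact ⟨_, _, rfl⟩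

-- A's accumulator loop is "join the segments with a space".
theorem copyspacesGo_eq (sp : List Int) : ∀ (r s : List Char),
    copyspacesGo r s sp = r ++ PySem.Chars.join [' '] (pvSegs s sp) := by
  induction sp with
  | nil => intro r s; simp [copyspacesGo, pvSegs, PySem.Chars.join_singleton]
  | cons n t ih =>
      intro r s
      obtain ⟨q, rest, hq⟩ := pvSegs_ne_nil (PySem.List.slice s (some n) none) t
      simp only [copyspacesGo, pvSegs, ih, hq, PySem.Chars.join_cons_cons]
      simp

-- B's loop computes exactly the segments of A, read at the absolute offset i (all lengths nonnegative).
theorem copyspacesAltGo_eq (s : List Char) (sp : List Int) (hsp : ∀ n ∈ sp, 0 ≤ n) :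
    ∀ (i : Int), 0 ≤ i →
    copyspacesAltGo s i sp = pvSegs (s.drop i.toNat) sp := by
  induction sp with
  | nil =>
      intro i hi0
      simp [copyspacesAltGo, pvSegs, PySem.List.slice_from s hi0]
  | cons n t ih =>
      intro i hi0
      have hn : 0 ≤ n := hsp n (by simp)
      have hin : 0 ≤ i + n := by omega
      have hhead : PySem.List.slice s (some i) (some (i + n)) =
          PySem.List.slice (s.drop i.toNat) none (some n) := by
        rw [PySem.List.slice_toNat s hi0 hin, PySem.List.slice_to _ hn]
        congr 1
        omega
      have htail : PySem.List.slice (s.drop i.toNat) (some n) none = s.drop (i + n).toNat := by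
        rw [PySem.List.slice_from _ hn, List.drop_drop]
        congr 1
        omega
      simp only [copyspacesAltGo, pvSegs, hhead, htail]
      rw [ih (fun m hm => hsp m (by simp [hm])) (i + n) hin]

-- On the empty string every segment and the remainder are empty on both sides.
theorem copyspacesAltGo_nil (sp : List Int) : ∀ i : Int,
    copyspacesAltGo [] i sp = pvSegs [] sp := by
  induction sp with
  | nil => intro i; simp [copyspacesAltGo, pvSegs, PySem.List.slice]
  | cons n t ih => intro i; simp [copyspacesAltGo, pvSegs, PySem.List.slice, ih]

-- ===== VERDICT (by name: the statement is the Claim_ definition above) =====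
theorem copyspaces_spec : Claim_equal_copyspaces := by
  intro s sp _ hpre
  unfold Spec_copyspaces copyspaces copyspaces_alt
  rcases hpre with h | h | h
  · rw [copyspacesGo_eq, copyspacesAltGo_eq s.toList sp h 0 le_rfl]
    simp
  · match sp, h with
    | [], _ => simp [copyspacesGo, copyspacesAltGo, PySem.Chars.join_singleton]
    | [n], _ =>
        simp [copyspacesGo, copyspacesAltGo, PySem.Chars.join_cons_cons,
          PySem.Chars.join_singleton]
  · subst h
    simp only [show ("" : String).toList = ([] : List Char) from rfl]
    rw [copyspacesGo_eq, copyspacesAltGo_nil]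
    simp
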